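-- pv_equiv track=rewrite | github.com/mohamed17717/faculty-projects | truth-table.py | __split_relation
-- ===== SOURCE A (Python) =====
-- def __split_relation(elm):
--     """
--         this function cus numbers may be more than 1 digit and that will fuck my code
--     """
--     splitted = ()
--     digits = '0123456789'
--     container = ''
--     for i in elm:
--         if i in digits:
--             container += i
--         else:
--             if container:
--                 splitted += (container,)
--                 container = ''
--
--             splitted += (i, )
--     if container:
--         splitted += (container,)
--
--     return splitted
-- ===== SOURCE B (Python) =====
-- DIGITS = '0123456789'
--
-- def __split_relation(elm):
--     """Maximal-run scanner: slice out each maximal digit run, emit other chars singly."""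
--     out = []
--     i, n = 0, len(elm)
--     while i < n:
--         if elm[i] in DIGITS:
--             j = i + 1
--             while j < n and elm[j] in DIGITS:
--                 j += 1
--             out.append(elm[i:j])
--             i = j
--         else:
--             out.append(elm[i])
--             i += 1
--     return tuple(out)
-- ===== Notes on version B (the rewrite author's own statement) =====
-- stated objective: faster
-- what changed: Replaced the per-character accumulator loop with quadratic tuple concatenation by an index-based scanner that slices out each maximal digit run and collects tokens in a list.
import Mathlib
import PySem

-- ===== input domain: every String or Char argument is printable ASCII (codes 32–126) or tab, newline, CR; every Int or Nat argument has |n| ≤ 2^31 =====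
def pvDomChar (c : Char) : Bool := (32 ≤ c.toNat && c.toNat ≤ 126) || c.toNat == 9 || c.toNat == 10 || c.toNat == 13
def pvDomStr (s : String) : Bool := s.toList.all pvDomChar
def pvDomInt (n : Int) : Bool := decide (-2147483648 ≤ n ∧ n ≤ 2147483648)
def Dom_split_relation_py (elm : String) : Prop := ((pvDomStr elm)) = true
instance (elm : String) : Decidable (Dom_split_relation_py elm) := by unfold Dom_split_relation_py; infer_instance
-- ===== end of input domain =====

-- B replaces A's char-by-char accumulator (quadratic tuple concatenation) with a
-- maximal-digit-run index scanner using list append and slices; objective: faster.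

-- shared char test: both Pythons test membership in the literal '0123456789'
def pyIsDigit (c : Char) : Bool := ("0123456789".toList).contains c

-- ===== PORT A =====
-- state: (splitted, container); container kept as List Char, '+=' is append
def stepA (st : List String × List Char) (i : Char) : List String × List Char :=
  if pyIsDigit i then (st.1, st.2 ++ [i])
  else
    let st' := if st.2.isEmpty then st else (st.1 ++ [String.ofList st.2], [])
    (st'.1 ++ [String.ofList [i]], st'.2)

def split_relation_py (elm : String) : List String :=
  let r := elm.toList.foldl stepA ([], [])
  if r.2.isEmpty then r.1 else r.1 ++ [String.ofList r.2]

-- ===== PORT B =====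
-- the inner while loop scanning a maximal digit run = takeWhile/dropWhile
def altGo : List Char → List String
  | [] => []
  | c :: rest =>
    if pyIsDigit c then
      String.ofList (c :: rest.takeWhile pyIsDigit) :: altGo (rest.dropWhile pyIsDigit)
    else
      String.ofList [c] :: altGo rest
termination_by l => l.length
decreasing_by
  · exact Nat.lt_succ_of_le (List.length_dropWhile_le _ _)
  · exact Nat.lt_succ_self _

def split_relation_py_alt (elm : String) : List String := altGo elm.toList

-- ===== PRECONDITION & SPEC =====
def Spec_split_relation_py (elm : String) (out : List String) : Prop := out = split_relation_py_alt elm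
instance (elm : String) (out : List String) : Decidable (Spec_split_relation_py elm out) := by unfold Spec_split_relation_py; infer_instance

-- ===== CLAIM (what is proved, stated in full; the proofs are below) =====
def Claim_equal_split_relation_py : Prop := ∀ (elm : String), Dom_split_relation_py elm → Spec_split_relation_py elm (split_relation_py elm)

-- ===== LEMMAS AND PROOFS =====

def finishA (st : List String × List Char) : List String :=
  if st.2.isEmpty then st.1 else st.1 ++ [String.ofList st.2]

lemma foldl_stepA_inv (cs : List Char) : ∀ (spl : List String) (cont : List Char),
    finishA (cs.foldl stepA (spl, cont)) =
      spl ++ (if cont.isEmpty then altGo cs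
              else String.ofList (cont ++ cs.takeWhile pyIsDigit) :: altGo (cs.dropWhile pyIsDigit)) := by
  induction cs with
  | nil =>
    intro spl cont
    cases cont with
    | nil => simp [finishA, altGo]
    | cons c cont' => simp [finishA, altGo, List.takeWhile]
  | cons c rest ih =>
    intro spl cont
    by_cases hd : pyIsDigit c = true
    · have hstep : stepA (spl, cont) c = (spl, cont ++ [c]) := by
        simp [stepA, hd]
      cases cont with
      | nil =>
        simp only [List.foldl_cons, hstep, ih, List.isEmpty_nil,
          List.nil_append]
        simp [altGo, hd]
      | cons x xs =>
        simp only [List.foldl_cons, hstep, ih]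
        simp [List.takeWhile, List.dropWhile, hd]
    · have hd' : pyIsDigit c = false := by simp [hd]
      cases cont with
      | nil =>
        have hstep : stepA (spl, ([] : List Char)) c = (spl ++ [String.ofList [c]], []) := by
          simp [stepA, hd']
        simp only [List.foldl_cons, hstep, ih]
        simp [altGo, hd']
      | cons x xs =>
        have hstep : stepA (spl, x :: xs) c
            = (spl ++ [String.ofList (x :: xs)] ++ [String.ofList [c]], []) := by
          simp [stepA, hd']
        simp only [List.foldl_cons, hstep, ih]
        simp [altGo, hd', List.takeWhile, List.dropWhile]

-- ===== VERDICT (by name: the statement is the Claim_ definition above) =====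
theorem split_relation_py_spec : Claim_equal_split_relation_py := by
  intro elm _
  show split_relation_py elm = split_relation_py_alt elm
  have h := foldl_stepA_inv elm.toList [] []
  simpa [split_relation_py, split_relation_py_alt, finishA] using h
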